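-- pv_equiv track=rewrite | github.com/inawrath/PokerHands | deck/help.py | getNumberCardsSameValue
-- ===== SOURCE A (Python) =====
-- def getNumberCardsSameValue(list_cards):
--     values = {}
--     for card in list_cards:
--         number = card['number'].upper()
--         if values.get(number, False):
--             values[number] += 1
--         else:
--             values[number] = 1
--     return values
-- ===== SOURCE B (Python) =====
-- def getNumberCardsSameValue(list_cards):
--     def group(keys):
--         if not keys:
--             return {}
--         k = keys[0]
--         rest = [x for x in keys if x != k]
--         out = {k: len(keys) - len(rest)}
--         out.update(group(rest))
--         return out
--     return group([card['number'].upper() for card in list_cards])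
-- ===== Notes on version B (the rewrite author's own statement) =====
-- stated objective: alternative
-- what changed: Replaces A's single-pass dict-increment loop by a partition recursion: take the first uppercased value, compute its multiplicity as the length drop after filtering it out, and recurse on the filtered remainder, so no counting dict is ever incremented.
import Mathlib
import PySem

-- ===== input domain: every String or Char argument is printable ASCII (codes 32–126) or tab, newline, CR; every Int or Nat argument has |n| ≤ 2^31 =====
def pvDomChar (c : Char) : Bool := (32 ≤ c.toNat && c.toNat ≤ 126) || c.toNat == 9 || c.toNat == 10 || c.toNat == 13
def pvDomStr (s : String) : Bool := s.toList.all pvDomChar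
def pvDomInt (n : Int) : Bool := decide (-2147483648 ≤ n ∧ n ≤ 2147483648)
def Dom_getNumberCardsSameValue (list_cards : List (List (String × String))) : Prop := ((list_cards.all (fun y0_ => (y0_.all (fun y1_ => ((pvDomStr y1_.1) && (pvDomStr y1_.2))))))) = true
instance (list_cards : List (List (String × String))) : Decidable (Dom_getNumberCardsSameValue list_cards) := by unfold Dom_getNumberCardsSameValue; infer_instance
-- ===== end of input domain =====

-- B replaces A's dict-increment loop by a partition recursion (strip all copies of the first
-- value, its multiplicity is the length drop, recurse on the remainder); objective: alternative.

-- ===== PORT A =====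
def getNumberCardsSameValue (list_cards : List (List (String × String))) : List (String × Int) :=
  (list_cards.foldl (fun values card =>
      let number := PySem.Str.upper ((PySem.Dict.mk card).getD "number" "")
      -- values.get(number, False): an int count is truthy iff ≠ 0, missing key gives the falsy False
      match values.get? number with
      | some v => if v ≠ 0 then values.insert number (v + 1) else values.insert number 1
      | none => values.insert number 1)
    (PySem.Dict.empty : PySem.Dict String Int)).items

-- ===== PORT B =====
-- Source B's inner 'group': partition recursion over the list of uppercased values
def pvGroupB : List String → List (String × Int)
  | [] => []
  | k :: ks =>
    let rest := (k :: ks).filter (fun x => x ≠ k)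
    (k, ((k :: ks).length : Int) - (rest.length : Int)) :: pvGroupB rest
termination_by l => l.length
decreasing_by
  simp only [List.filter_cons, decide_not, ne_eq, List.length_cons]
  exact Nat.lt_succ_of_le (List.length_filter_le _ _)

def getNumberCardsSameValue_alt (list_cards : List (List (String × String))) : List (String × Int) :=
  pvGroupB (list_cards.map (fun card => PySem.Str.upper ((PySem.Dict.mk card).getD "number" "")))

-- ===== PRECONDITION & SPEC =====
-- Pre_ excludes only the inputs on which A raises KeyError: a card without a "number" key.
def Pre_getNumberCardsSameValue (list_cards : List (List (String × String))) : Prop :=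
  ∀ card ∈ list_cards, "number" ∈ card.map Prod.fst
instance (list_cards : List (List (String × String))) : Decidable (Pre_getNumberCardsSameValue list_cards) := by unfold Pre_getNumberCardsSameValue; infer_instance

def pvWitness_getNumberCardsSameValue : (List (List (String × String))) :=
  [[("number", "a"), ("suit", "S")], [("number", "A")], [("number", "7")]]

def Spec_getNumberCardsSameValue (list_cards : List (List (String × String))) (out : List (String × Int)) : Prop := out = getNumberCardsSameValue_alt list_cards
instance (list_cards : List (List (String × String))) (out : List (String × Int)) : Decidable (Spec_getNumberCardsSameValue list_cards out) := by unfold Spec_getNumberCardsSameValue; infer_instance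

-- ===== CLAIM (what is proved, stated in full; the proofs are below) =====
def Claim_equal_getNumberCardsSameValue : Prop := ∀ (list_cards : List (List (String × String))), Dom_getNumberCardsSameValue list_cards → Pre_getNumberCardsSameValue list_cards → Spec_getNumberCardsSameValue list_cards (getNumberCardsSameValue list_cards)

-- ===== LEMMAS AND PROOFS =====

-- A's loop body is exactly a Counter increment.
theorem stepA_eq_modify (d : PySem.Dict String Int) (k : String) :
    (match d.get? k with
     | some v => if v ≠ 0 then d.insert k (v + 1) else d.insert k 1
     | none => d.insert k 1) = d.modify k 0 (· + 1) := by
  cases h : d.get? k with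
  | none => simp [PySem.Dict.modify, PySem.Dict.getD, h]
  | some v =>
      by_cases hv : v = 0 <;>
        simp [PySem.Dict.modify, PySem.Dict.getD, h, hv]

-- dedup commutes with a filter that drops an element not passing it
theorem ofList_filter_comm (p : String → Bool) (ks : List String) :
    (PySem.Set.ofList ks).filter p = PySem.Set.ofList (ks.filter p) := by
  induction ks with
  | nil => simp [PySem.Set.ofList_nil]
  | cons x xs ih =>
      rw [PySem.Set.ofList_cons, PySem.Set.discard]
      by_cases hx : p x = true
      · simp only [List.filter_cons, hx, List.filter_filter,
          PySem.Set.ofList_cons, PySem.Set.discard, ← ih, if_true]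
        congr 1
        exact List.filter_congr (fun a _ => by rw [Bool.and_comm])
      · have hx' : p x = false := by simpa using hx
        simp only [List.filter_cons, hx', List.filter_filter]
        have : (fun a => p a && !(a == x)) = p := by
          funext a
          by_cases hax : a = x
          · subst hax; simp [hx']
          · simp [hax]
        rw [this, ih]
        simp

-- pvGroupB computes the dedup-keyed count table
theorem pvGroupB_eq (ks : List String) :
    pvGroupB ks = (PySem.Set.ofList ks).map (fun j => (j, (ks.count j : Int))) := by
  induction ks using pvGroupB.induct with
  | case1 => simp [pvGroupB, PySem.Set.ofList_nil]
  | case2 k ks rest ih =>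
      rw [pvGroupB]
      have hrest : (k :: ks).filter (fun x => x ≠ k) = ks.filter (fun y => !(y == k)) := by
        simp only [List.filter_cons, decide_not, ne_eq]
        exact List.filter_congr (fun a _ => by by_cases h : a = k <;> simp [h])
      rw [PySem.Set.ofList_cons, PySem.Set.discard, List.map_cons]
      rw [ofList_filter_comm]
      simp only [rest, hrest] at ih ⊢
      rw [ih]
      congr 1
      · -- head: (k::ks).length - rest.length = count of k in k::ks
        simp only [Prod.mk.injEq, true_and]
        have hsplit : ks.length = (ks.filter (fun y => !(y == k))).length + ks.count k := by
          have h0 := List.length_eq_countP_add_countP (l := ks) (p := fun y => !(y == k))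
          rw [← List.countP_eq_length_filter]
          have h2 : List.countP (fun a => decide ¬(!(a == k)) = true) ks = List.countP (fun a => a == k) ks :=
            List.countP_congr (fun a _ => by simp)
          simp only [List.count] at *
          omega
        have hc : (k :: ks).count k = ks.count k + 1 := by simp
        simp only [List.length_cons, hc]
        push_cast
        omega
      · -- tail: counts of j ≠ k agree between k::ks and the filtered remainder
        refine List.map_congr_left (fun j hj => ?_)
        have hjmem : j ∈ ks.filter (fun y => !(y == k)) := (PySem.Set.mem_ofList _ _).mp hj
        have hjk : j ≠ k := by
          have := List.of_mem_filter hjmem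
          simpa using this
        have h1 : (ks.filter (fun y => !(y == k))).count j = ks.count j :=
          List.count_filter (by simp [hjk])
        have h2 : (k :: ks).count j = ks.count j := List.count_cons_of_ne (Ne.symm hjk)
        rw [h1, h2]

-- the two passes agree once both run over the list of uppercased values
theorem folds_agree (keys : List String) :
    (keys.foldl (fun values number =>
        match values.get? number with
        | some v => if v ≠ 0 then values.insert number (v + 1) else values.insert number 1
        | none => values.insert number 1)
      (PySem.Dict.empty : PySem.Dict String Int)).items
    = pvGroupB keys := by
  have h1 : (keys.foldl (fun values number =>
      match values.get? number with
      | some v => if v ≠ 0 then values.insert number (v + 1) else values.insert number 1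
      | none => values.insert number 1)
      (PySem.Dict.empty : PySem.Dict String Int)) = PySem.Dict.counter keys := by
    rw [PySem.Dict.counter_eq_foldl]
    have hfun : (fun (values : PySem.Dict String Int) number =>
        match values.get? number with
        | some v => if v ≠ 0 then values.insert number (v + 1) else values.insert number 1
        | none => values.insert number 1)
        = fun (d : PySem.Dict String Int) x => d.modify x 0 (· + 1) :=
      funext fun d => funext fun k => stepA_eq_modify d k
    rw [hfun]
  rw [h1, PySem.Dict.items_counter, pvGroupB_eq]

-- ===== VERDICT (by name: the statement is the Claim_ definition above) =====
theorem getNumberCardsSameValue_spec : Claim_equal_getNumberCardsSameValue := by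
  intro lc _ _
  unfold Spec_getNumberCardsSameValue getNumberCardsSameValue getNumberCardsSameValue_alt
  have hm := (List.foldl_map
    (f := fun card => PySem.Str.upper ((PySem.Dict.mk card).getD "number" ""))
    (g := fun (values : PySem.Dict String Int) number =>
      match values.get? number with
      | some v => if v ≠ 0 then values.insert number (v + 1) else values.insert number 1
      | none => values.insert number 1)
    (l := lc) (init := (PySem.Dict.empty : PySem.Dict String Int)))
  exact (congrArg PySem.Dict.items hm.symm).trans
    (folds_agree (lc.map (fun card => PySem.Str.upper ((PySem.Dict.mk card).getD "number" ""))))
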